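-- pv_equiv track=rewrite | github.com/iairplane/DRNCScontraction | valid_hierarchy.py | intersections_and_unions
-- ===== SOURCE A (Python) =====
-- def intersections_and_unions(path1, path2):
--     intersection_nodes = set()  # 用于存储所有交集节点
--
--     # 计算交集：检查路径中相邻的节点是否匹配
--     for i in range(len(path1) - 1):
--         if path1[i] in path2 and path1[i + 1] in path2:
--             intersection_nodes.add(path1[i])     # 添加当前节点
--             intersection_nodes.add(path1[i + 1]) # 添加下一个节点
--
--     # 求并集：不同节点总数
--     union_count = len(set(path1).union(set(path2)))
--
--     return len(intersection_nodes), union_count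
-- ===== SOURCE B (Python) =====
-- def intersections_and_unions(path1, path2):
--     # One pass over path1 with a run accumulator: maximal runs of consecutive
--     # elements that lie in set(path2); runs of length >= 2 are intersection nodes.
--     set2 = set(path2)
--     intersection_nodes = set()
--     run = []
--     for x in path1:
--         if x in set2:
--             run.append(x)
--         else:
--             if len(run) >= 2:
--                 intersection_nodes.update(run)
--             run = []
--     if len(run) >= 2:
--         intersection_nodes.update(run)
--     union_count = len(set(path1) | set2)
--     return len(intersection_nodes), union_count
-- ===== Notes on version B (the rewrite author's own statement) =====
-- stated objective: faster
-- what changed: Replaces the index loop that rescans path2 (a list) twice per position with a hash set of path2 and a single run-accumulator pass over path1 that flushes maximal in-set runs of length >= 2 into the intersection set.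
import Mathlib
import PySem

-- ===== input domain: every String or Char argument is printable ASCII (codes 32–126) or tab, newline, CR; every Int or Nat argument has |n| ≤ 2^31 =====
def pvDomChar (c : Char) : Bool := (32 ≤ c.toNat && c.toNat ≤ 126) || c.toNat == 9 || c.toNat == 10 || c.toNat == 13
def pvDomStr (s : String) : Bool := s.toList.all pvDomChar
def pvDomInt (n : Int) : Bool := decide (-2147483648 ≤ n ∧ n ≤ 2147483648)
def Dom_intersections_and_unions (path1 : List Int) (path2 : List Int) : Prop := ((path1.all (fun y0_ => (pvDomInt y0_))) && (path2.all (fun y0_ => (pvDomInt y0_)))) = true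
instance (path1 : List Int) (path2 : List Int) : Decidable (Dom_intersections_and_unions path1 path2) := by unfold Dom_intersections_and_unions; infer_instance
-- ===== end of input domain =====

-- B replaces A's index loop (which rescans path2 per position) by one run-accumulator
-- pass over path1 against set(path2); objective: faster.

-- ===== PORT A =====
def intersections_and_unions (path1 : List Int) (path2 : List Int) : Int × Int :=
  let inter := (PySem.List.pyRange 0 ((path1.length : Int) - 1) 1).foldl
    (fun s i =>
      if PySem.List.pyGetD path1 i 0 ∈ path2 ∧ PySem.List.pyGetD path1 (i + 1) 0 ∈ path2 then
        PySem.Set.add (PySem.Set.add s (PySem.List.pyGetD path1 i 0)) (PySem.List.pyGetD path1 (i + 1) 0)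
      else s)
    PySem.Set.empty
  let unionCount := PySem.Set.len (PySem.Set.union (PySem.Set.ofList path1) (PySem.Set.ofList path2))
  (PySem.Set.len inter, unionCount)

-- ===== PORT B =====
-- flush of Source B's run accumulator ("if len(run) >= 2: intersection_nodes.update(run)")
def iauFlush (inter : PySem.Set Int) (run : List Int) : PySem.Set Int :=
  if 2 ≤ run.length then PySem.Set.update inter run else inter

def intersections_and_unions_alt (path1 : List Int) (path2 : List Int) : Int × Int :=
  let set2 := PySem.Set.ofList path2
  let st := path1.foldl
    (fun (st : PySem.Set Int × List Int) x =>
      if PySem.Set.contains set2 x then (st.1, st.2 ++ [x])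
      else (iauFlush st.1 st.2, []))
    (PySem.Set.empty, [])
  let inter := iauFlush st.1 st.2
  (PySem.Set.len inter, PySem.Set.len (PySem.Set.union (PySem.Set.ofList path1) set2))

-- ===== PRECONDITION & SPEC =====
def Spec_intersections_and_unions (path1 : List Int) (path2 : List Int) (out : Int × Int) : Prop := out = intersections_and_unions_alt path1 path2
instance (path1 : List Int) (path2 : List Int) (out : Int × Int) : Decidable (Spec_intersections_and_unions path1 path2 out) := by unfold Spec_intersections_and_unions; infer_instance

-- ===== CLAIM (what is proved, stated in full; the proofs are below) =====
def Claim_equal_intersections_and_unions : Prop := ∀ (path1 : List Int) (path2 : List Int), Dom_intersections_and_unions path1 path2 → Spec_intersections_and_unions path1 path2 (intersections_and_unions path1 path2)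

-- ===== LEMMAS AND PROOFS =====

def iauPairs (path2 : List Int) : List Int → List Int
  | a :: b :: t => (if a ∈ path2 ∧ b ∈ path2 then [a, b] else []) ++ iauPairs path2 (b :: t)
  | _ => []

theorem iauPairs_cons_false (path2 : List Int) (x : Int) (hx : x ∉ path2) (v : List Int) :
    iauPairs path2 (x :: v) = iauPairs path2 v := by
  cases v with
  | nil => rfl
  | cons a t => simp [iauPairs, hx]

theorem iauPairs_split (path2 : List Int) (x : Int) (hx : x ∉ path2) (v : List Int) :
    ∀ u : List Int, iauPairs path2 (u ++ x :: v) = iauPairs path2 (u ++ [x]) ++ iauPairs path2 (x :: v) := by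
  intro u
  induction u with
  | nil => simp [iauPairs]
  | cons a u' ih =>
    cases u' with
    | nil => simp [iauPairs, hx, iauPairs_cons_false path2 x hx]
    | cons b u'' =>
      simp only [List.cons_append, iauPairs, List.append_assoc]
      rw [show b :: (u'' ++ x :: v) = b :: u'' ++ x :: v from rfl, ih]
      simp

theorem iauPairs_allTrue (path2 : List Int) (r : List Int) (hr : ∀ x ∈ r, x ∈ path2) (y : Int) :
    y ∈ iauPairs path2 r ↔ 2 ≤ r.length ∧ y ∈ r := by
  induction r with
  | nil => simp [iauPairs]
  | cons a r' ih =>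
    cases r' with
    | nil => simp [iauPairs]
    | cons b t =>
      have ha : a ∈ path2 := hr a (by simp)
      have hb : b ∈ path2 := hr b (by simp)
      have ih' := ih (fun x hx => hr x (by simp [hx]))
      simp only [iauPairs, ha, hb, and_self, if_true, List.mem_append, ih']
      constructor
      · rintro h
        refine ⟨by simp, ?_⟩
        rcases h with h | ⟨-, h2⟩
        · simp at h; rcases h with h | h <;> simp [h]
        · simp at h2 ⊢; tauto
      · rintro ⟨-, h⟩
        simp at h
        rcases h with h | h | h
        · left; simp [h]
        · left; simp [h]
        · right
          refine ⟨?_, by simp [h]⟩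
          have := List.length_pos_of_mem h
          simp; omega

theorem iauPairs_append_false (path2 : List Int) (x : Int) (hx : x ∉ path2) (u : List Int)
    (hu : ∀ z ∈ u, z ∈ path2) (y : Int) :
    y ∈ iauPairs path2 (u ++ [x]) ↔ 2 ≤ u.length ∧ y ∈ u := by
  induction u with
  | nil => simp [iauPairs]
  | cons a u' ih =>
    cases u' with
    | nil => simp [iauPairs, hx]
    | cons b u'' =>
      have ha : a ∈ path2 := hu a (by simp)
      have hb : b ∈ path2 := hu b (by simp)
      have ih' := ih (fun z hz => hu z (by simp [hz]))
      simp only [List.cons_append] at ih' ⊢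
      simp only [iauPairs, ha, hb, and_self, if_true, List.mem_append, ih']
      constructor
      · rintro h
        refine ⟨by simp, ?_⟩
        rcases h with h | ⟨-, h2⟩
        · simp at h; rcases h with h | h <;> simp [h]
        · simp at h2 ⊢; tauto
      · rintro ⟨-, h⟩
        simp at h
        rcases h with h | h | h
        · left; simp [h]
        · left; simp [h]
        · right
          refine ⟨?_, by simp [h]⟩
          have := List.length_pos_of_mem h
          simp; omega



theorem iauFlush_mem (s : PySem.Set Int) (r : List Int) (y : Int) :
    y ∈ iauFlush s r ↔ y ∈ s ∨ (2 ≤ r.length ∧ y ∈ r) := by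
  unfold iauFlush; split_ifs with h
  · simp [PySem.Set.mem_update, h]
  · simp [h]

theorem iauFlush_nodup (s : PySem.Set Int) (r : List Int) (hs : s.Nodup) :
    (iauFlush s r).Nodup := by
  unfold iauFlush; split_ifs
  · exact PySem.Set.nodup_update _ _ hs
  · exact hs

theorem iauFoldB_mem (path2 : List Int) (l : List Int) :
    ∀ (s : PySem.Set Int) (r : List Int), (∀ z ∈ r, z ∈ path2) → ∀ y : Int,
    (y ∈ iauFlush (l.foldl (fun (st : PySem.Set Int × List Int) x =>
        if PySem.Set.contains (PySem.Set.ofList path2) x then (st.1, st.2 ++ [x])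
        else (iauFlush st.1 st.2, [])) (s, r)).1
      ((l.foldl (fun (st : PySem.Set Int × List Int) x =>
        if PySem.Set.contains (PySem.Set.ofList path2) x then (st.1, st.2 ++ [x])
        else (iauFlush st.1 st.2, [])) (s, r)).2)
      ↔ y ∈ s ∨ y ∈ iauPairs path2 (r ++ l)) := by
  induction l with
  | nil =>
    intro s r hr y
    simp only [List.foldl_nil, List.append_nil, iauFlush_mem]
    rw [iauPairs_allTrue path2 r hr]
  | cons x t ih =>
    intro s r hr y
    by_cases hx : x ∈ path2
    · have hxb : (PySem.Set.ofList path2).contains x = true := by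
        rw [PySem.Set.contains_iff, PySem.Set.mem_ofList]; exact hx
      have hr' : ∀ z ∈ r ++ [x], z ∈ path2 := by
        intro z hz
        rcases List.mem_append.mp hz with h | h
        · exact hr z h
        · simp at h; simpa [h] using hx
      simp only [List.foldl_cons, hxb, if_true]
      rw [ih s (r ++ [x]) hr' y]
      simp
    · have hxb : (PySem.Set.ofList path2).contains x = false := by
        rw [Bool.eq_false_iff]
        simp [PySem.Set.mem_ofList, hx]
      simp only [List.foldl_cons, hxb, Bool.false_eq_true, if_false]
      rw [ih (iauFlush s r) [] (by simp) y]
      rw [iauFlush_mem, iauPairs_split path2 x hx t r, iauPairs_cons_false path2 x hx t]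
      rw [List.mem_append]
      rw [iauPairs_append_false path2 x hx r hr y]
      simp; tauto

theorem iauFoldB_nodup (path2 : List Int) (l : List Int) :
    ∀ (s : PySem.Set Int) (r : List Int), s.Nodup →
    (iauFlush (l.foldl (fun (st : PySem.Set Int × List Int) x =>
        if PySem.Set.contains (PySem.Set.ofList path2) x then (st.1, st.2 ++ [x])
        else (iauFlush st.1 st.2, [])) (s, r)).1
      ((l.foldl (fun (st : PySem.Set Int × List Int) x =>
        if PySem.Set.contains (PySem.Set.ofList path2) x then (st.1, st.2 ++ [x])
        else (iauFlush st.1 st.2, [])) (s, r)).2)).Nodup := by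
  induction l with
  | nil => intro s r hs; exact iauFlush_nodup _ _ hs
  | cons x t ih =>
    intro s r hs
    by_cases hx : (PySem.Set.ofList path2).contains x = true
    · simp only [List.foldl_cons, hx, if_true]; exact ih s (r ++ [x]) hs
    · rw [Bool.not_eq_true] at hx
      simp only [List.foldl_cons, hx, Bool.false_eq_true, if_false]
      exact ih _ [] (iauFlush_nodup _ _ hs)

theorem iauFoldA_mem (path2 path1 : List Int) (L : List Int) :
    ∀ (s : PySem.Set Int) (y : Int),
    (y ∈ L.foldl (fun s i =>
      if PySem.List.pyGetD path1 i 0 ∈ path2 ∧ PySem.List.pyGetD path1 (i + 1) 0 ∈ path2 then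
        PySem.Set.add (PySem.Set.add s (PySem.List.pyGetD path1 i 0)) (PySem.List.pyGetD path1 (i + 1) 0)
      else s) s
    ↔ y ∈ s ∨ ∃ i ∈ L, PySem.List.pyGetD path1 i 0 ∈ path2 ∧ PySem.List.pyGetD path1 (i + 1) 0 ∈ path2 ∧
        (y = PySem.List.pyGetD path1 i 0 ∨ y = PySem.List.pyGetD path1 (i + 1) 0)) := by
  induction L with
  | nil => simp
  | cons j t ih =>
    intro s y
    by_cases hj : PySem.List.pyGetD path1 j 0 ∈ path2 ∧ PySem.List.pyGetD path1 (j + 1) 0 ∈ path2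
    · simp only [List.foldl_cons, if_pos hj, ih, PySem.Set.mem_add, List.mem_cons]
      constructor
      · rintro (((h | h) | h) | h)
        · left; exact h
        · right; exact ⟨j, Or.inl rfl, hj.1, hj.2, Or.inl h⟩
        · right; exact ⟨j, Or.inl rfl, hj.1, hj.2, Or.inr h⟩
        · rcases h with ⟨i, hi, h1, h2, h3⟩; right; exact ⟨i, Or.inr hi, h1, h2, h3⟩
      · rintro (h | ⟨i, hi, h1, h2, h3⟩)
        · left; left; left; exact h
        · rcases hi with rfl | hi
          · rcases h3 with h3 | h3
            · left; left; right; exact h3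
            · left; right; exact h3
          · right; exact ⟨i, hi, h1, h2, h3⟩
    · simp only [List.foldl_cons, if_neg hj, ih, List.mem_cons]
      constructor
      · rintro (h | ⟨i, hi, hrest⟩)
        · left; exact h
        · right; exact ⟨i, Or.inr hi, hrest⟩
      · rintro (h | ⟨i, hi, hrest⟩)
        · left; exact h
        · rcases hi with rfl | hi
          · exact absurd ⟨hrest.1, hrest.2.1⟩ hj
          · right; exact ⟨i, hi, hrest⟩

theorem iauFoldA_nodup (path2 path1 : List Int) (L : List Int) :
    ∀ (s : PySem.Set Int), s.Nodup →
    (L.foldl (fun s i =>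
      if PySem.List.pyGetD path1 i 0 ∈ path2 ∧ PySem.List.pyGetD path1 (i + 1) 0 ∈ path2 then
        PySem.Set.add (PySem.Set.add s (PySem.List.pyGetD path1 i 0)) (PySem.List.pyGetD path1 (i + 1) 0)
      else s) s).Nodup := by
  induction L with
  | nil => intro s hs; exact hs
  | cons j t ih =>
    intro s hs
    simp only [List.foldl_cons]
    split_ifs
    · exact ih _ (PySem.Set.nodup_add _ _ (PySem.Set.nodup_add _ _ hs))
    · exact ih _ hs

theorem iauPairs_mem (path2 : List Int) (l : List Int) (y : Int) :
    y ∈ iauPairs path2 l ↔ ∃ i : Nat, ∃ _ : i + 1 < l.length,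
      l[i] ∈ path2 ∧ l[i+1] ∈ path2 ∧ (y = l[i] ∨ y = l[i+1]) := by
  induction l with
  | nil => simp [iauPairs]
  | cons a r' ih =>
    cases r' with
    | nil => simp [iauPairs]
    | cons b t =>
      rw [show iauPairs path2 (a :: b :: t)
            = (if a ∈ path2 ∧ b ∈ path2 then [a, b] else []) ++ iauPairs path2 (b :: t) from rfl]
      rw [List.mem_append, ih]
      constructor
      · rintro (h | ⟨i, hi, h1, h2, h3⟩)
        · by_cases hc : a ∈ path2 ∧ b ∈ path2
          · rw [if_pos hc] at h
            simp only [List.mem_cons] at h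
            exact ⟨0, by simp, by simpa using hc.1, by simpa using hc.2, by simpa using h⟩
          · rw [if_neg hc] at h; simp at h
        · refine ⟨i + 1, by simp at hi ⊢; omega, by simpa using h1, by simpa using h2, by simpa using h3⟩
      · rintro ⟨i, hi, h1, h2, h3⟩
        cases i with
        | zero =>
          left
          rw [if_pos ⟨by simpa using h1, by simpa using h2⟩]
          simpa using h3
        | succ n =>
          right
          exact ⟨n, by simp at hi ⊢; omega, by simpa using h1, by simpa using h2, by simpa using h3⟩

theorem iau_mem_eq (path1 path2 : List Int) (y : Int) :
    (∃ i ∈ PySem.List.pyRange 0 ((path1.length : Int) - 1) 1,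
       PySem.List.pyGetD path1 i 0 ∈ path2 ∧ PySem.List.pyGetD path1 (i + 1) 0 ∈ path2 ∧
       (y = PySem.List.pyGetD path1 i 0 ∨ y = PySem.List.pyGetD path1 (i + 1) 0))
    ↔ y ∈ iauPairs path2 path1 := by
  rw [iauPairs_mem]
  constructor
  · rintro ⟨i, hi, h1, h2, h3⟩
    rw [PySem.List.mem_pyRange_one] at hi
    have h0 : 0 ≤ i := hi.1
    have hlt : i.toNat + 1 < path1.length := by omega
    have e1 : PySem.List.pyGetD path1 i 0 = path1[i.toNat] :=
      PySem.List.pyGetD_eq_getElem path1 0 h0 (by omega)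
    have e2 : PySem.List.pyGetD path1 (i + 1) 0 = path1[i.toNat + 1] := by
      have := PySem.List.pyGetD_eq_getElem path1 (i := i + 1) 0 (by omega) (by omega)
      rw [this]
      have hn : (i + 1).toNat = i.toNat + 1 := by omega
      simp only [hn]
    exact ⟨i.toNat, hlt, by rw [← e1]; exact h1, by rw [← e2]; exact h2,
      by rw [← e1, ← e2]; exact h3⟩
  · rintro ⟨k, hk, h1, h2, h3⟩
    refine ⟨(k : Int), ?_, ?_, ?_, ?_⟩
    · rw [PySem.List.mem_pyRange_one]; constructor <;> [positivity; omega]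
    · rw [PySem.List.pyGetD_ofNat path1 k 0 (by omega)]; exact h1
    · have : ((k : Int) + 1) = ((k + 1 : Nat) : Int) := by push_cast; ring
      rw [this, PySem.List.pyGetD_ofNat path1 (k + 1) 0 (by omega)]; exact h2
    · have : ((k : Int) + 1) = ((k + 1 : Nat) : Int) := by push_cast; ring
      rw [this, PySem.List.pyGetD_ofNat path1 k 0 (by omega),
          PySem.List.pyGetD_ofNat path1 (k + 1) 0 (by omega)]
      exact h3

theorem intersections_and_unions_spec : Claim_equal_intersections_and_unions := by
  unfold Claim_equal_intersections_and_unions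
  intro path1 path2 _
  unfold Spec_intersections_and_unions intersections_and_unions intersections_and_unions_alt
  dsimp only
  have hnodA := iauFoldA_nodup path2 path1
    (PySem.List.pyRange 0 ((path1.length : Int) - 1) 1) PySem.Set.empty List.nodup_nil
  have hnodB := iauFoldB_nodup path2 path1 PySem.Set.empty [] List.nodup_nil
  have hmem : ∀ y : Int,
      (y ∈ (PySem.List.pyRange 0 ((path1.length : Int) - 1) 1).foldl
        (fun s i =>
          if PySem.List.pyGetD path1 i 0 ∈ path2 ∧ PySem.List.pyGetD path1 (i + 1) 0 ∈ path2 then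
            PySem.Set.add (PySem.Set.add s (PySem.List.pyGetD path1 i 0)) (PySem.List.pyGetD path1 (i + 1) 0)
          else s) PySem.Set.empty) ↔
      y ∈ iauFlush (List.foldl (fun (st : PySem.Set Int × List Int) x =>
          if PySem.Set.contains (PySem.Set.ofList path2) x then (st.1, st.2 ++ [x])
          else (iauFlush st.1 st.2, [])) (PySem.Set.empty, []) path1).1
        ((List.foldl (fun (st : PySem.Set Int × List Int) x =>
          if PySem.Set.contains (PySem.Set.ofList path2) x then (st.1, st.2 ++ [x])
          else (iauFlush st.1 st.2, [])) (PySem.Set.empty, []) path1).2) := by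
    intro y
    rw [iauFoldA_mem path2 path1 _ PySem.Set.empty y,
        iauFoldB_mem path2 path1 PySem.Set.empty [] (by simp) y]
    rw [iau_mem_eq path1 path2 y]
    simp [PySem.Set.empty]
  have hperm := (List.perm_ext_iff_of_nodup hnodA hnodB).mpr hmem
  have hlen := hperm.length_eq
  simp only [PySem.Set.len, hlen]
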